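-- pv_equiv track=rewrite | github.com/Satyam-2004/leetcode-dsa-practice | contest/weekly-contest-474/minimum-time-to-complete-all-deliveries.py | mininumTime
-- ===== SOURCE A (Python) =====
-- from typing import List
--
-- from math import gcd
--
-- def mininumTime(d: List[int], r: List[int]) -> int:
--     d1, d2 = d[0], d[1]
--     r1, r2 = r[0], r[1]
--     D = d1 + d2
--
--     def lcm(a: int, b: int) -> int:
--         return a * b // gcd(a, b)
--
--     def can(t: int) -> bool:
--         if t < D:
--             return False
--         avail1 = t - (t // r1)
--         avail2 = t - (t // r2)
--         if avail1 < d1 or avail2 < d2: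
--             return False
--         lc = lcm(r1, r2)
--         lost = t // lc
--         avail_slots = t - lost
--         return avail_slots >= D
--
--     low = D
--     high = D + max(r1, r2) * max(d1, d2)
--     while low < high:
--         mid = (low + high) // 2
--         if can(mid):
--             high = mid
--         else:
--             low = mid + 1
--     return low
-- ===== SOURCE B (Python) =====
-- from math import gcd
-- from typing import List
--
-- def mininumTime(d: List[int], r: List[int]) -> int:
--     # Closed-form: can(t) is a conjunction of monotone threshold constraints,
--     # so the answer is the max of the per-constraint minimal times, clamped to high.
--     d1, d2 = d[0], d[1]
--     r1, r2 = r[0], r[1]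
--     low = d1 + d2
--     high = low + max(r1, r2) * max(d1, d2)
--     if high <= low:
--         return low
--
--     lc = r1 * r2 // gcd(r1, r2)
--
--     def threshold(rr: int, need: int) -> int:
--         # least t with t - t // rr >= need; 'high' when unreachable (rr == 1, need > 0)
--         if rr == 1:
--             return low if need <= 0 else high
--         return rr * (need - 1) // (rr - 1) + 1
--
--     t = max(low, threshold(r1, d1), threshold(r2, d2), threshold(lc, low))
--     return min(t, high)
-- ===== Notes on version B (the rewrite author's own statement) =====
-- stated objective: alternative
-- what changed: Replaces the combined-predicate binary search with closed-form per-constraint minimal times (floor-division formulas) whose max, clamped to the search's upper bound, is the answer.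
import Mathlib
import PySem

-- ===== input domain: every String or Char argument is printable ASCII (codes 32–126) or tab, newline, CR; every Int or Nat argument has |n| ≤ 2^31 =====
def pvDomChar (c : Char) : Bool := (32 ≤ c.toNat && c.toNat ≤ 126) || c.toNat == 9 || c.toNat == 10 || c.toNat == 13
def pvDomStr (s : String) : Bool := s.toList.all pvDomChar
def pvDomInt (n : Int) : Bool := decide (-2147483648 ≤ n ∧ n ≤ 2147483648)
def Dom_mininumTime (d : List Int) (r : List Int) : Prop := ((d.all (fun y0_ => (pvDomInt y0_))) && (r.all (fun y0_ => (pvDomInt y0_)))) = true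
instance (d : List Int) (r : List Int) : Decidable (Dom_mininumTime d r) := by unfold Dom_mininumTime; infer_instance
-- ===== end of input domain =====

-- B replaces A's combined-predicate binary search by closed-form per-constraint thresholds (alternative decomposition, same result).

-- ===== PORT A =====
-- lcm(a, b) = a * b // gcd(a, b)
def pvLcmA (a b : Int) : Int := PySem.Int.floordiv (a * b) (Int.gcd a b)

-- can(t)
def pvCan (d1 d2 r1 r2 t : Int) : Bool :=
  if t < d1 + d2 then false
  else
    let avail1 := t - PySem.Int.floordiv t r1
    let avail2 := t - PySem.Int.floordiv t r2
    if avail1 < d1 || avail2 < d2 then false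
    else
      let lost := PySem.Int.floordiv t (pvLcmA r1 r2)
      decide (t - lost ≥ d1 + d2)

-- the while-loop of the binary search
def pvLoop (d1 d2 r1 r2 low high : Int) : Int :=
  if h : low < high then
    if pvCan d1 d2 r1 r2 (PySem.Int.floordiv (low + high) 2) then
      pvLoop d1 d2 r1 r2 low (PySem.Int.floordiv (low + high) 2)
    else
      pvLoop d1 d2 r1 r2 (PySem.Int.floordiv (low + high) 2 + 1) high
  else low
termination_by (high - low).toNat
decreasing_by
  · have h1 := (PySem.Int.le_floordiv_iff_mul_le (a := low + high) (b := 2) (q := low) (by norm_num)).2 (by omega)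
    have h2 := (PySem.Int.floordiv_lt_iff_lt_mul (a := low + high) (b := 2) (q := high) (by norm_num)).2 (by omega)
    omega
  · have h1 := (PySem.Int.le_floordiv_iff_mul_le (a := low + high) (b := 2) (q := low) (by norm_num)).2 (by omega)
    have h2 := (PySem.Int.floordiv_lt_iff_lt_mul (a := low + high) (b := 2) (q := high) (by norm_num)).2 (by omega)
    omega

def mininumTime (d : List Int) (r : List Int) : Int :=
  let d1 := (PySem.List.pyGet? d 0).getD 0
  let d2 := (PySem.List.pyGet? d 1).getD 0
  let r1 := (PySem.List.pyGet? r 0).getD 0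
  let r2 := (PySem.List.pyGet? r 1).getD 0
  pvLoop d1 d2 r1 r2 (d1 + d2) (d1 + d2 + max r1 r2 * max d1 d2)

-- ===== PORT B =====
-- least t with t - t // rr >= need; 'high' when unreachable (rr == 1, need > 0)
def pvThreshold (low high rr need : Int) : Int :=
  if rr = 1 then (if need ≤ 0 then low else high)
  else PySem.Int.floordiv (rr * (need - 1)) (rr - 1) + 1

def mininumTime_alt (d : List Int) (r : List Int) : Int :=
  let d1 := (PySem.List.pyGet? d 0).getD 0
  let d2 := (PySem.List.pyGet? d 1).getD 0
  let r1 := (PySem.List.pyGet? r 0).getD 0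
  let r2 := (PySem.List.pyGet? r 1).getD 0
  let low := d1 + d2
  let high := low + max r1 r2 * max d1 d2
  if high ≤ low then low
  else
    let lc := PySem.Int.floordiv (r1 * r2) (Int.gcd r1 r2)
    let t := max (max (max low (pvThreshold low high r1 d1)) (pvThreshold low high r2 d2))
               (pvThreshold low high lc low)
    min t high

-- ===== PRECONDITION & SPEC =====
-- Pre_ excludes only the inputs on which A raises: lists shorter than 2 (IndexError) and
-- a zero rest period when the binary-search loop actually runs (ZeroDivisionError).
def Pre_mininumTime (d : List Int) (r : List Int) : Prop :=
  2 ≤ d.length ∧ 2 ≤ r.length ∧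
  (0 < max r[0]! r[1]! * max d[0]! d[1]! → r[0]! ≠ 0 ∧ r[1]! ≠ 0)
instance (d : List Int) (r : List Int) : Decidable (Pre_mininumTime d r) := by
  unfold Pre_mininumTime; infer_instance

def pvWitness_mininumTime : List Int × List Int := ([3, 4], [2, 3])

def Spec_mininumTime (d : List Int) (r : List Int) (out : Int) : Prop := out = mininumTime_alt d r
instance (d : List Int) (r : List Int) (out : Int) : Decidable (Spec_mininumTime d r out) := by
  unfold Spec_mininumTime; infer_instance

-- ===== CLAIM (what is proved, stated in full; the proofs are below) =====
def Claim_equal_mininumTime : Prop := ∀ (d : List Int) (r : List Int), Dom_mininumTime d r → Pre_mininumTime d r → Spec_mininumTime d r (mininumTime d r)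

-- ===== LEMMAS AND PROOFS =====

-- the availability constraint 'need ≤ t - t // rr' is exactly 't at least the closed-form threshold'
lemma pv_thr_iff (low high rr need t : Int) (hrr : rr ≠ 0)
    (hlt : low ≤ t) (hth : t < high) :
    (need ≤ t - PySem.Int.floordiv t rr) ↔ (pvThreshold low high rr need ≤ t) := by
  unfold pvThreshold
  rcases eq_or_ne rr 1 with h1 | h1
  · subst h1
    have : PySem.Int.floordiv t 1 = t := by
      rw [PySem.Int.floordiv_eq_ediv_of_pos (by norm_num)]; simp
    rw [this]
    by_cases hn : need ≤ 0 <;> simp [hn] <;> omega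
  · simp only [if_neg h1]
    rcases lt_or_gt_of_ne hrr with hneg | hpos
    · -- rr ≤ -1 : rewrite both floordivs through -a / -b
      have m1 : PySem.Int.floordiv t rr = PySem.Int.floordiv (-t) (-rr) := by
        rw [PySem.Int.floordiv_neg_neg]
      have m2 : PySem.Int.floordiv (rr * (need - 1)) (rr - 1)
          = PySem.Int.floordiv (-(rr * (need - 1))) (-(rr - 1)) := by
        rw [PySem.Int.floordiv_neg_neg]
      rw [m1, m2]
      have hm : (0:Int) < -rr := by omega
      have hm1 : (0:Int) < -(rr - 1) := by omega
      constructor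
      · intro h
        have hq : PySem.Int.floordiv (-t) (-rr) ≤ t - need := by omega
        have : ¬ (t - need + 1 ≤ PySem.Int.floordiv (-t) (-rr)) := by omega
        rw [PySem.Int.le_floordiv_iff_mul_le hm] at this
        push Not at this
        have goal' : PySem.Int.floordiv (-(rr * (need - 1))) (-(rr - 1)) < t := by
          rw [PySem.Int.floordiv_lt_iff_lt_mul hm1]
          nlinarith [this]
        omega
      · intro h
        have h' : PySem.Int.floordiv (-(rr * (need - 1))) (-(rr - 1)) < t := by omega
        rw [PySem.Int.floordiv_lt_iff_lt_mul hm1] at h'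
        have : ¬ ((t - need + 1) * -rr ≤ -t) := by nlinarith [h']
        rw [← PySem.Int.le_floordiv_iff_mul_le hm] at this
        omega
    · -- rr ≥ 2 (rr ≠ 1, rr > 0)
      have h2 : (0:Int) < rr - 1 := by omega
      constructor
      · intro h
        have : ¬ (t - need + 1 ≤ PySem.Int.floordiv t rr) := by omega
        rw [PySem.Int.le_floordiv_iff_mul_le hpos] at this
        push Not at this
        have goal' : PySem.Int.floordiv (rr * (need - 1)) (rr - 1) < t := by
          rw [PySem.Int.floordiv_lt_iff_lt_mul h2]
          nlinarith [this]
        omega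
      · intro h
        have h' : PySem.Int.floordiv (rr * (need - 1)) (rr - 1) < t := by omega
        rw [PySem.Int.floordiv_lt_iff_lt_mul h2] at h'
        have : ¬ ((t - need + 1) * rr ≤ t) := by nlinarith [h']
        rw [← PySem.Int.le_floordiv_iff_mul_le hpos] at this
        omega

-- the binary search over a threshold predicate returns the threshold clamped to [l, h]
lemma pv_loop_eq (d1 d2 r1 r2 K low0 high0 : Int)
    (hK : ∀ t, low0 ≤ t → t < high0 → (pvCan d1 d2 r1 r2 t = decide (K ≤ t))) :
    ∀ n (l h : Int), (h - l).toNat ≤ n → low0 ≤ l → h ≤ high0 → l ≤ h →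
      pvLoop d1 d2 r1 r2 l h = min (max l K) h := by
  intro n
  induction n with
  | zero =>
    intro l h hn hl hh hlh
    have : l = h := by omega
    subst this
    rw [pvLoop]
    simp
  | succ n ih =>
    intro l h hn hl hh hlh
    rw [pvLoop]
    by_cases hlt : l < h
    · simp only [dif_pos hlt]
      have hmid1 := (PySem.Int.le_floordiv_iff_mul_le (a := l + h) (b := 2) (q := l) (by norm_num)).2 (by omega)
      have hmid2 := (PySem.Int.floordiv_lt_iff_lt_mul (a := l + h) (b := 2) (q := h) (by norm_num)).2 (by omega)
      set mid := PySem.Int.floordiv (l + h) 2 with hmid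
      have hcan := hK mid (by omega) (by omega)
      rw [hcan]
      by_cases hKm : K ≤ mid
      · simp only [decide_eq_true_eq, if_pos hKm]
        rw [ih l mid (by omega) hl (by omega) (by omega)]
        omega
      · simp only [decide_eq_true_eq, if_neg hKm]
        rw [ih (mid + 1) h (by omega) (by omega) hh (by omega)]
        omega
    · simp only [dif_neg hlt]
      omega

-- lcm of two nonzero ints is nonzero
lemma pv_lcm_ne (r1 r2 : Int) (h1 : r1 ≠ 0) (h2 : r2 ≠ 0) : pvLcmA r1 r2 ≠ 0 := by
  unfold pvLcmA
  have hg : (0:Int) < (Int.gcd r1 r2 : Int) := by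
    exact_mod_cast Nat.pos_of_ne_zero (fun h => h1 (by simpa using Int.eq_zero_of_gcd_eq_zero_left h))
  have hdvd : ((Int.gcd r1 r2 : Int)) ∣ r1 * r2 := dvd_mul_of_dvd_left (Int.gcd_dvd_left r1 r2) r2
  obtain ⟨c, hc⟩ := hdvd
  rw [PySem.Int.floordiv_eq_ediv_of_pos hg, hc, Int.mul_ediv_cancel_left _ (by omega)]
  intro hc0
  rw [hc0, mul_zero] at hc
  exact (mul_ne_zero h1 h2) hc

-- with both rests nonzero, can(t) is 't at least the max of the three thresholds' on [low, high)
lemma pv_can_eq (d1 d2 r1 r2 low high : Int) (h1 : r1 ≠ 0) (h2 : r2 ≠ 0)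
    (hlow : low = d1 + d2) :
    ∀ t, low ≤ t → t < high →
      pvCan d1 d2 r1 r2 t =
        decide (max (max (max low (pvThreshold low high r1 d1)) (pvThreshold low high r2 d2))
          (pvThreshold low high (pvLcmA r1 r2) low) ≤ t) := by
  intro t hlt hth
  have hT1 := pv_thr_iff low high r1 d1 t h1 hlt hth
  have hT2 := pv_thr_iff low high r2 d2 t h2 hlt hth
  have hT3 := pv_thr_iff low high (pvLcmA r1 r2) low t (pv_lcm_ne r1 r2 h1 h2) hlt hth
  unfold pvCan
  rw [if_neg (by omega)]
  by_cases hav : t - PySem.Int.floordiv t r1 < d1 ∨ t - PySem.Int.floordiv t r2 < d2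
  · rw [if_pos (by simpa using hav)]
    have : ¬ (max (max (max low (pvThreshold low high r1 d1)) (pvThreshold low high r2 d2))
        (pvThreshold low high (pvLcmA r1 r2) low) ≤ t) := by omega
    rw [eq_comm, decide_eq_false_iff_not]
    exact this
  · rw [if_neg (by simpa using hav)]
    push Not at hav
    simp only [decide_eq_decide]
    omega

-- ===== VERDICT (by name: the statement is the Claim_ definition above) =====
theorem mininumTime_spec : Claim_equal_mininumTime := by
  intro d r hdom hpre
  obtain ⟨hd, hr, hz⟩ := hpre
  rcases d with _ | ⟨d1, d⟩; · simp at hd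
  rcases d with _ | ⟨d2, d⟩; · simp at hd
  rcases r with _ | ⟨r1, r⟩; · simp at hr
  rcases r with _ | ⟨r2, r⟩; · simp at hr
  unfold Spec_mininumTime mininumTime mininumTime_alt
  simp only [PySem.List.pyGet?_zero_cons,
    show ∀ (x y : Int) (t : List Int), PySem.List.pyGet? (x :: y :: t) (1:Int) = some y by
      intro x y t; simp [PySem.List.pyGet?, PySem.List.pyIdx?],
    Option.getD_some]
  simp only [List.getElem!_cons_zero, List.getElem!_cons_succ] at hz
  set low := d1 + d2 with hlow
  set high := low + max r1 r2 * max d1 d2 with hhigh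
  by_cases hc : high ≤ low
  · rw [pvLoop, dif_neg (by omega), if_pos hc]
  · rw [if_neg hc]
    obtain ⟨h1, h2⟩ := hz (by omega)
    have hKeq := pv_can_eq d1 d2 r1 r2 low high h1 h2 hlow
    have hloop := pv_loop_eq d1 d2 r1 r2
      (max (max (max low (pvThreshold low high r1 d1)) (pvThreshold low high r2 d2))
        (pvThreshold low high (pvLcmA r1 r2) low))
      low high hKeq (high - low).toNat low high (le_refl _) (le_refl _) (le_refl _) (by omega)
    rw [hloop]
    unfold pvLcmA
    omega
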